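-- pv_equiv track=rewrite | github.com/Qianruipku/ferminet | ferminet/utils/check.py | _get_similar_keys
-- ===== SOURCE A (Python) =====
-- def _get_similar_keys(key, key_list):
--   """Find keys similar to the given key, focusing on likely typos."""
--   import difflib
--
--   # First check for very close matches that are likely typos
--   filtered_matches = []
--
--   for existing_key in key_list:
--     # Skip if one is clearly an extension of the other (e.g., batch_size vs batch_size_2)
--     if key.startswith(existing_key + '_') or existing_key.startswith(key + '_'):
--       continue
--
--     # Skip if length difference is too large
--     if abs(len(key) - len(existing_key)) > 3:
--       continue
--
--     # Calculate edit distance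
--     edit_dist = _simple_edit_distance(key.lower(), existing_key.lower())
--
--     # Only suggest if it's a very close match (1-2 character difference)
--     if edit_dist <= 2:
--       # For very short keys, be more strict
--       if len(key) <= 4 and edit_dist > 1:
--         continue
--       filtered_matches.append(existing_key)
--
--   # Sort by similarity (closer matches first)
--   filtered_matches.sort(key=lambda x: _simple_edit_distance(key.lower(), x.lower()))
--
--   return filtered_matches[:3]  # Return top 3 matches
--
-- def _simple_edit_distance(s1, s2):
--   """Calculate simple edit distance between two strings."""
--   if len(s1) > len(s2):
--     s1, s2 = s2, s1
--
--   distances = list(range(len(s1) + 1))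
--   for i2, c2 in enumerate(s2):
--     new_distances = [i2 + 1]
--     for i1, c1 in enumerate(s1):
--       if c1 == c2:
--         new_distances.append(distances[i1])
--       else:
--         new_distances.append(1 + min(distances[i1], distances[i1 + 1], new_distances[-1]))
--     distances = new_distances
--   return distances[-1]
-- ===== SOURCE B (Python) =====
-- def _get_similar_keys(key, key_list):
--   """Bucket matches by edit distance (0/1/2) in one pass -- no sort, each distance computed once."""
--   kl = key.lower()
--   klen = len(key)
--   buckets = ([], [], [])
--   for existing_key in key_list:
--     if key.startswith(existing_key + '_') or existing_key.startswith(key + '_'):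
--       continue
--     if abs(klen - len(existing_key)) > 3:
--       continue
--     d = _simple_edit_distance(kl, existing_key.lower())
--     if d <= 2 and not (klen <= 4 and d > 1):
--       buckets[d].append(existing_key)
--   return (buckets[0] + buckets[1] + buckets[2])[:3]
--
-- def _simple_edit_distance(s1, s2):
--   """Calculate simple edit distance between two strings."""
--   if len(s1) > len(s2):
--     s1, s2 = s2, s1
--   distances = list(range(len(s1) + 1))
--   for i2, c2 in enumerate(s2):
--     new_distances = [i2 + 1]
--     for i1, c1 in enumerate(s1):
--       if c1 == c2:
--         new_distances.append(distances[i1])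
--       else:
--         new_distances.append(1 + min(distances[i1], distances[i1 + 1], new_distances[-1]))
--     distances = new_distances
--   return distances[-1]
-- ===== Notes on version B (the rewrite author's own statement) =====
-- stated objective: alternative
-- what changed: Instead of collecting survivors and then re-sorting them with the edit distance recomputed inside the sort key, B makes one pass that computes each edit distance once and appends the key to the bucket of its distance (0, 1 or 2), then returns the first three of the concatenated buckets (bucket order = stable sort order).
import Mathlib
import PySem

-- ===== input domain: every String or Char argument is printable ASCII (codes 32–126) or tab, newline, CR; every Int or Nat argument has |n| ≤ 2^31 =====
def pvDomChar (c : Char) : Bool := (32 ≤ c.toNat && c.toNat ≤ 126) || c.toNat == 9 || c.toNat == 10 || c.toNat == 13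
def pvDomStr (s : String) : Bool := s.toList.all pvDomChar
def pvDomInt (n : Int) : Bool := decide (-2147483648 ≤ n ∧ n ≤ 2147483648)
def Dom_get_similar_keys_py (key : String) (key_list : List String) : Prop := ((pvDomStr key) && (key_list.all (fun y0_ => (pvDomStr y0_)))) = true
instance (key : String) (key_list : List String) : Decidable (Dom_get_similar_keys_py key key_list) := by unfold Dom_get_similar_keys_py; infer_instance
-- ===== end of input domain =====

-- B replaces A's filter-then-resort (edit distance recomputed inside the sort key) by one pass that
-- drops each surviving key into a distance bucket (0/1/2) and concatenates the buckets: no sort at all.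


-- ===== PORT A =====
-- helper _simple_edit_distance (identical in Source A and Source B, so shared by both ports).
-- inner 'for i1, c1 in enumerate(s1)' loop: consumes s1 and the previous row in step,
-- carrying new_distances[-1] (the last value appended). The final catch-all arm is
-- unreachable: the row always has length s1.length + 1.
def pvEditRow (c2 : Char) : List Char → List Nat → Nat → List Nat
  | [], _, _ => []
  | c1 :: s1, d0 :: d1 :: ds, last =>
      let v := if c1 = c2 then d0 else 1 + min d0 (min d1 last)
      v :: pvEditRow c2 s1 (d1 :: ds) v
  | _ :: _, _, _ => []

-- outer 'for i2, c2 in enumerate(s2)' loop; i2 is the enumerate counter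
def pvEditLoop (s1 : List Char) : List Char → List Nat → Nat → List Nat
  | [], ds, _ => ds
  | c2 :: s2, ds, i2 => pvEditLoop s1 s2 ((i2 + 1) :: pvEditRow c2 s1 ds (i2 + 1)) (i2 + 1)

def pvSimpleEditDistance (a b : List Char) : Nat :=
  let p := if a.length > b.length then (b, a) else (a, b)
  PySem.List.pyGetD (pvEditLoop p.1 p.2 (List.range (p.1.length + 1)) 0) (-1) 0

-- _simple_edit_distance(key.lower(), x.lower()): computed in A's loop, in A's sort key and in B's loop
def pvKey (key : String) (x : String) : Nat :=
  pvSimpleEditDistance (PySem.Chars.lower key.toList) (PySem.Chars.lower x.toList)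

-- the body of A's 'for existing_key in key_list' loop
def pvStepA (key : String) (acc : List String) (existing_key : String) : List String :=
  if PySem.Chars.startswith key.toList (existing_key.toList ++ ['_'])
     || PySem.Chars.startswith existing_key.toList (key.toList ++ ['_']) then acc
  else if ((key.toList.length : Int) - (existing_key.toList.length : Int)).natAbs > 3 then acc
  else
    -- edit_dist = pvKey key existing_key
    if pvKey key existing_key ≤ 2 then
      if key.toList.length ≤ 4 ∧ pvKey key existing_key > 1 then acc
      else acc ++ [existing_key]
    else acc

def get_similar_keys_py (key : String) (key_list : List String) : List String :=
  -- filtered_matches = the loop's result; then sort by the edit distance and take [:3]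
  PySem.List.slice
    (PySem.List.sorted (key_list.foldl (pvStepA key) []) (fun x => pvKey key x)) none (some 3)

-- ===== PORT B =====
-- the body of B's loop: same filters, then the key goes to the bucket of its distance
def pvStepB (key : String) (b : List String × List String × List String) (existing_key : String) :
    List String × List String × List String :=
  if PySem.Chars.startswith key.toList (existing_key.toList ++ ['_'])
     || PySem.Chars.startswith existing_key.toList (key.toList ++ ['_']) then b
  else if ((key.toList.length : Int) - (existing_key.toList.length : Int)).natAbs > 3 then b
  else
    -- d = pvKey key existing_key
    if pvKey key existing_key ≤ 2 ∧ ¬ (key.toList.length ≤ 4 ∧ pvKey key existing_key > 1) then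
      if pvKey key existing_key = 0 then (b.1 ++ [existing_key], b.2.1, b.2.2)
      else if pvKey key existing_key = 1 then (b.1, b.2.1 ++ [existing_key], b.2.2)
      else (b.1, b.2.1, b.2.2 ++ [existing_key])
    else b

def get_similar_keys_py_alt (key : String) (key_list : List String) : List String :=
  -- bs = the three buckets after the loop; concatenate and take [:3]
  PySem.List.slice
    ((key_list.foldl (pvStepB key) ([], [], [])).1 ++ (key_list.foldl (pvStepB key) ([], [], [])).2.1
      ++ (key_list.foldl (pvStepB key) ([], [], [])).2.2) none (some 3)

-- ===== PRECONDITION & SPEC =====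
def Spec_get_similar_keys_py (key : String) (key_list : List String) (out : List String) : Prop := out = get_similar_keys_py_alt key key_list
instance (key : String) (key_list : List String) (out : List String) : Decidable (Spec_get_similar_keys_py key key_list out) := by unfold Spec_get_similar_keys_py; infer_instance

-- ===== CLAIM (what is proved, stated in full; the proofs are below) =====
def Claim_equal_get_similar_keys_py : Prop := ∀ (key : String) (key_list : List String), Dom_get_similar_keys_py key key_list → Spec_get_similar_keys_py key key_list (get_similar_keys_py key key_list)

-- ===== LEMMAS AND PROOFS =====

lemma pv_insertBy_append {α : Type} (before : α → α → Bool) (x : α) (ys zs : List α)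
    (h : ∀ y ∈ ys, before x y = false) :
    PySem.List.insertBy before x (ys ++ zs) = ys ++ PySem.List.insertBy before x zs := by
  induction ys with
  | nil => simp
  | cons y ys ih =>
    simp only [List.cons_append, PySem.List.insertBy, h y (by simp)]
    simp only [Bool.false_eq_true, if_false]
    rw [ih (fun y hy => h y (by simp [hy]))]

lemma pv_insertBy_all_before {α : Type} (before : α → α → Bool) (x : α) (zs : List α)
    (h : ∀ y ∈ zs, before x y = true) :
    PySem.List.insertBy before x zs = x :: zs := by
  cases zs with
  | nil => simp [PySem.List.insertBy]
  | cons y ys => simp [PySem.List.insertBy, h y (by simp)]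

lemma pv_sorted_append_singleton {α κ : Type} [LT κ] [DecidableLT κ] (xs : List α) (x : α)
    (key : α → κ) :
    PySem.List.sorted (xs ++ [x]) key
      = PySem.List.insertBy (fun a b => decide (key a < key b)) x (PySem.List.sorted xs key) := by
  rw [PySem.List.sorted_eq_foldl_insertBy, PySem.List.sorted_eq_foldl_insertBy, List.foldl_append]
  rfl

-- stable sort by a key with values in {0,1,2} = the three buckets, concatenated
lemma pv_fold_inv (key : String) (l : List String) :
    ∀ (acc b0 b1 b2 : List String),
    PySem.List.sorted acc (fun x => pvKey key x) = b0 ++ b1 ++ b2 →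
    (∀ x ∈ b0, pvKey key x = 0) → (∀ x ∈ b1, pvKey key x = 1) → (∀ x ∈ b2, pvKey key x = 2) →
    PySem.List.sorted (l.foldl (pvStepA key) acc) (fun x => pvKey key x)
      = (l.foldl (pvStepB key) (b0, b1, b2)).1 ++ (l.foldl (pvStepB key) (b0, b1, b2)).2.1
          ++ (l.foldl (pvStepB key) (b0, b1, b2)).2.2 := by
  induction l with
  | nil => intro acc b0 b1 b2 hs _ _ _; simpa using hs
  | cons x l ih =>
    intro acc b0 b1 b2 hs h0 h1 h2
    simp only [List.foldl_cons]
    by_cases hskip : (PySem.Chars.startswith key.toList (x.toList ++ ['_'])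
        || PySem.Chars.startswith x.toList (key.toList ++ ['_'])) = true
    · rw [show pvStepA key acc x = acc by simp only [pvStepA]; rw [if_pos hskip],
          show pvStepB key (b0, b1, b2) x = (b0, b1, b2) by simp only [pvStepB]; rw [if_pos hskip]]
      exact ih acc b0 b1 b2 hs h0 h1 h2
    by_cases hlen : ((key.toList.length : Int) - (x.toList.length : Int)).natAbs > 3
    · rw [show pvStepA key acc x = acc by simp only [pvStepA]; rw [if_neg hskip, if_pos hlen],
          show pvStepB key (b0, b1, b2) x = (b0, b1, b2) by
            simp only [pvStepB]; rw [if_neg hskip, if_pos hlen]]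
      exact ih acc b0 b1 b2 hs h0 h1 h2
    by_cases hle : pvKey key x ≤ 2
    · by_cases hns : key.toList.length ≤ 4 ∧ pvKey key x > 1
      · -- too strict for a short key: both sides drop x
        rw [show pvStepA key acc x = acc by
              simp only [pvStepA]; rw [if_neg hskip, if_neg hlen, if_pos hle, if_pos hns],
            show pvStepB key (b0, b1, b2) x = (b0, b1, b2) by
              simp only [pvStepB]; rw [if_neg hskip, if_neg hlen, if_neg (fun h => h.2 hns)]]
        exact ih acc b0 b1 b2 hs h0 h1 h2
      · -- kept: A appends to the flat list, B appends to bucket (pvKey key x)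
        rw [show pvStepA key acc x = acc ++ [x] by
              simp only [pvStepA]; rw [if_neg hskip, if_neg hlen, if_pos hle, if_neg hns]]
        have hsx : PySem.List.sorted (acc ++ [x]) (fun y => pvKey key y)
            = PySem.List.insertBy (fun a b => decide (pvKey key a < pvKey key b)) x
                (PySem.List.sorted acc (fun y => pvKey key y)) :=
          pv_sorted_append_singleton acc x (fun y => pvKey key y)
        have hd : pvKey key x = 0 ∨ pvKey key x = 1 ∨ pvKey key x = 2 := by omega
        rcases hd with hd | hd | hd
        · rw [show pvStepB key (b0, b1, b2) x = (b0 ++ [x], b1, b2) by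
                simp only [pvStepB]; rw [if_neg hskip, if_neg hlen, if_pos ⟨hle, hns⟩, if_pos hd]]
          refine ih (acc ++ [x]) (b0 ++ [x]) b1 b2 ?_ ?_ h1 h2
          · rw [hsx, hs, List.append_assoc,
              pv_insertBy_append _ x b0 (b1 ++ b2) (by intro y hy; simp [hd, h0 y hy]),
              pv_insertBy_all_before _ x (b1 ++ b2) (by
                intro y hy; rcases List.mem_append.1 hy with hy | hy
                · simp [hd, h1 y hy]
                · simp [hd, h2 y hy])]
            simp
          · intro y hy; rcases List.mem_append.1 hy with hy | hy
            · exact h0 y hy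
            · simpa [List.mem_singleton.1 hy] using hd
        · rw [show pvStepB key (b0, b1, b2) x = (b0, b1 ++ [x], b2) by
                simp only [pvStepB]
                rw [if_neg hskip, if_neg hlen, if_pos ⟨hle, hns⟩,
                  if_neg (by omega : ¬ pvKey key x = 0), if_pos hd]]
          refine ih (acc ++ [x]) b0 (b1 ++ [x]) b2 ?_ h0 ?_ h2
          · rw [hsx, hs,
              pv_insertBy_append _ x (b0 ++ b1) b2 (by
                intro y hy; rcases List.mem_append.1 hy with hy | hy
                · simp [hd, h0 y hy]
                · simp [hd, h1 y hy]),
              pv_insertBy_all_before _ x b2 (by intro y hy; simp [hd, h2 y hy])]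
            simp
          · intro y hy; rcases List.mem_append.1 hy with hy | hy
            · exact h1 y hy
            · simpa [List.mem_singleton.1 hy] using hd
        · rw [show pvStepB key (b0, b1, b2) x = (b0, b1, b2 ++ [x]) by
                simp only [pvStepB]
                rw [if_neg hskip, if_neg hlen, if_pos ⟨hle, hns⟩,
                  if_neg (by omega : ¬ pvKey key x = 0), if_neg (by omega : ¬ pvKey key x = 1)]]
          refine ih (acc ++ [x]) b0 b1 (b2 ++ [x]) ?_ h0 h1 ?_
          · rw [hsx, hs,
              PySem.List.insertBy_of_forall_not_before _ x (b0 ++ b1 ++ b2) (by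
                intro y hy
                rcases List.mem_append.1 hy with hy | hy
                · rcases List.mem_append.1 hy with hy | hy
                  · simp [hd, h0 y hy]
                  · simp [hd, h1 y hy]
                · simp [hd, h2 y hy])]
            simp
          · intro y hy; rcases List.mem_append.1 hy with hy | hy
            · exact h2 y hy
            · simpa [List.mem_singleton.1 hy] using hd
    · -- edit distance above 2: both sides drop x
      rw [show pvStepA key acc x = acc by
            simp only [pvStepA]; rw [if_neg hskip, if_neg hlen, if_neg hle],
          show pvStepB key (b0, b1, b2) x = (b0, b1, b2) by
            simp only [pvStepB]; rw [if_neg hskip, if_neg hlen, if_neg (fun h => hle h.1)]]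
      exact ih acc b0 b1 b2 hs h0 h1 h2

-- ===== VERDICT (by name: the statement is the Claim_ definition above) =====
theorem get_similar_keys_py_spec : Claim_equal_get_similar_keys_py := by
  intro key key_list _
  unfold Spec_get_similar_keys_py get_similar_keys_py get_similar_keys_py_alt
  rw [pv_fold_inv key key_list [] [] [] [] (by rfl) (by simp) (by simp) (by simp)]
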